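-- pv_equiv track=rewrite | github.com/polossk/DSML-Logs | Huawei2018CodeCraft-GSCPGZ/submit/regTree.py | isSameVal
-- ===== SOURCE A (Python) =====
-- def isSameVal(dataSet):
--     res = set()
--     for hoge in dataSet:
--         res.add(hoge[-1])
--     if len(res) == 1:
--         return True
--     else:
--         return False
-- ===== SOURCE B (Python) =====
-- def isSameVal(dataSet):
--     seen = False
--     first = None
--     for row in dataSet:
--         if not seen:
--             first = row[-1]
--             seen = True
--         elif row[-1] != first:
--             return False
--     return seen
-- ===== Notes on version B (the rewrite author's own statement) =====
-- stated objective: simpler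
-- what changed: Replaces the set of last-column values with a sentinel first/seen scan that returns False at the first mismatching row, without building any container.
import Mathlib
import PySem

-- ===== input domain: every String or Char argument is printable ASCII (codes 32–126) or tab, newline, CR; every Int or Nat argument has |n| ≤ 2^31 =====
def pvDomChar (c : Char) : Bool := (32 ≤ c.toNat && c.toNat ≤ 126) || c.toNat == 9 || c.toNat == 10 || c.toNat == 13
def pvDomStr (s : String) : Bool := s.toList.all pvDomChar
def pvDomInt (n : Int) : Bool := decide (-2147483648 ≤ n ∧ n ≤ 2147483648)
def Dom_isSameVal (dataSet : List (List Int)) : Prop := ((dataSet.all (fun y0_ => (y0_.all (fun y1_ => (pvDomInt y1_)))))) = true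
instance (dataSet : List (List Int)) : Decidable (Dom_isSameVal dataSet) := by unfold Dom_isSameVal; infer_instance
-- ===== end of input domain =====

-- B replaces A's set of last-column values with a sentinel first/seen scan that stops at the
-- first mismatch and builds no container (objective: simpler).

-- ===== PORT A =====
-- the loop 'for hoge in dataSet: res.add(hoge[-1])'; none = IndexError on hoge[-1]
def isSameValLoopA : List (List Int) → PySem.Set Int → Option (PySem.Set Int)
  | [], res => some res
  | hoge :: rest, res =>
    match PySem.List.pyGet? hoge (-1) with
    | none => none
    | some v => isSameValLoopA rest (PySem.Set.add res v)

def isSameVal (dataSet : List (List Int)) : Bool :=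
  match isSameValLoopA dataSet PySem.Set.empty with
  | none => false   -- IndexError (an empty row); excluded by Pre_isSameVal
  | some res => if PySem.Set.len res == 1 then true else false

-- ===== PORT B =====
-- the loop over rows with state (seen, first) fused into an Option Int; none = IndexError on row[-1]
def isSameValLoopB : List (List Int) → Option Int → Option Bool
  | [], st => some st.isSome
  | row :: rest, st =>
    match PySem.List.pyGet? row (-1) with
    | none => none
    | some v =>
      match st with
      | none => isSameValLoopB rest (some v)
      | some first => if v ≠ first then some false else isSameValLoopB rest (some first)

def isSameVal_alt (dataSet : List (List Int)) : Bool :=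
  (isSameValLoopB dataSet none).getD false   -- getD unreachable under Pre_isSameVal

-- ===== PRECONDITION & SPEC =====
-- Pre_ excludes exactly the inputs containing an empty row, on which A raises IndexError at hoge[-1].
def Pre_isSameVal (dataSet : List (List Int)) : Prop := ∀ r ∈ dataSet, r ≠ []
instance (dataSet : List (List Int)) : Decidable (Pre_isSameVal dataSet) := by unfold Pre_isSameVal; infer_instance

def pvWitness_isSameVal : List (List Int) := [[1, 3], [2, 3], [5, 3]]

def Spec_isSameVal (dataSet : List (List Int)) (out : Bool) : Prop := out = isSameVal_alt dataSet
instance (dataSet : List (List Int)) (out : Bool) : Decidable (Spec_isSameVal dataSet out) := by unfold Spec_isSameVal; infer_instance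

-- ===== CLAIM (what is proved, stated in full; the proofs are below) =====
def Claim_equal_isSameVal : Prop := ∀ (dataSet : List (List Int)), Dom_isSameVal dataSet → Pre_isSameVal dataSet → Spec_isSameVal dataSet (isSameVal dataSet)

-- ===== LEMMAS AND PROOFS =====

-- the last-column value of a (nonempty) row, as a total function
def pvLast (r : List Int) : Int := (PySem.List.pyGet? r (-1)).getD 0

theorem pvGet_last {r : List Int} (h : r ≠ []) :
    PySem.List.pyGet? r (-1) = some (pvLast r) := by
  cases hv : r.getLast? with
  | none => exact absurd (List.getLast?_eq_none_iff.mp hv) h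
  | some v => simp [pvLast, PySem.List.pyGet?_neg_one, hv]

-- A's loop, under Pre_, is a fold of Set.add over the last values
theorem loopA_eq (rows : List (List Int)) (h : ∀ r ∈ rows, r ≠ []) (s : PySem.Set Int) :
    isSameValLoopA rows s = some ((rows.map pvLast).foldl PySem.Set.add s) := by
  induction rows generalizing s with
  | nil => rfl
  | cons r rest ih =>
    have hr := pvGet_last (h r (by simp))
    simp [isSameValLoopA, hr, ih (fun x hx => h x (by simp [hx]))]

-- B's loop, under Pre_, as a function of the last values
def pvAllEq : List Int → Option Int → Bool
  | [], st => st.isSome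
  | v :: vs, none => pvAllEq vs (some v)
  | v :: vs, some f => if v ≠ f then false else pvAllEq vs (some f)

theorem loopB_eq (rows : List (List Int)) (h : ∀ r ∈ rows, r ≠ []) (st : Option Int) :
    isSameValLoopB rows st = some (pvAllEq (rows.map pvLast) st) := by
  induction rows generalizing st with
  | nil => rfl
  | cons r rest ih =>
    have hr := pvGet_last (h r (by simp))
    have ih' := ih (fun x hx => h x (by simp [hx]))
    cases st with
    | none => simp [isSameValLoopB, hr, pvAllEq, ih']
    | some f =>
      by_cases hv : pvLast r = f <;> simp [isSameValLoopB, hr, pvAllEq, hv, ih']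

theorem pvAllEq_some (vs : List Int) (f : Int) :
    pvAllEq vs (some f) = decide (∀ v ∈ vs, v = f) := by
  induction vs with
  | nil => simp [pvAllEq]
  | cons v vs ih => by_cases hv : v = f <;> simp [pvAllEq, hv, ih]

theorem add_length_le {s : PySem.Set Int} {v : Int} :
    s.length ≤ (PySem.Set.add s v).length := by
  unfold PySem.Set.add; split <;> simp

theorem foldl_add_length_le (vs : List Int) (s : PySem.Set Int) :
    s.length ≤ (vs.foldl PySem.Set.add s).length := by
  induction vs generalizing s with
  | nil => simp
  | cons v vs ih => exact le_trans add_length_le (ih _)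

-- the set-cardinality test, on a set seeded with one element
theorem foldl_add_singleton (vs : List Int) (f : Int) :
    ((vs.foldl PySem.Set.add [f]).length = 1) ↔ (∀ v ∈ vs, v = f) := by
  induction vs with
  | nil => simp
  | cons v vs ih =>
    by_cases hv : v = f
    · have : PySem.Set.add [f] v = [f] := by
        simp [PySem.Set.add, PySem.Set.contains, hv]
      simpa [this, hv] using ih
    · have hc : PySem.Set.add [f] v = [f, v] := by
        simp [PySem.Set.add, PySem.Set.contains, hv]
      have hlen := foldl_add_length_le vs [f, v]
      constructor
      · intro hfold; simp [List.foldl, hc] at hfold; simp at hlen; omega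
      · intro hall; exact absurd (hall v (by simp)) hv

-- ===== VERDICT (by name: the statement is the Claim_ definition above) =====
theorem isSameVal_spec : Claim_equal_isSameVal := by
  intro dataSet _ hpre
  unfold Spec_isSameVal isSameVal isSameVal_alt
  cases dataSet with
  | nil => rfl
  | cons r rest =>
    have hr := pvGet_last (hpre r (by simp))
    have hrest : ∀ x ∈ rest, x ≠ [] := fun x hx => hpre x (by simp [hx])
    have hA := loopA_eq rest hrest [pvLast r]
    have hB := loopB_eq rest hrest (some (pvLast r))
    rw [show isSameValLoopA (r :: rest) PySem.Set.empty = isSameValLoopA rest [pvLast r] from by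
          simp [isSameValLoopA, hr, PySem.Set.add, PySem.Set.empty, PySem.Set.contains],
        hA,
        show isSameValLoopB (r :: rest) none = isSameValLoopB rest (some (pvLast r)) from by
          simp [isSameValLoopB, hr],
        hB]
    simp only [Option.getD_some, pvAllEq_some]
    by_cases h : ∀ v ∈ rest.map pvLast, v = pvLast r
    · have h1 := (foldl_add_singleton (rest.map pvLast) (pvLast r)).mpr h
      simp [PySem.Set.len, h1]
      exact fun a ha => h _ (List.mem_map_of_mem ha)
    · have hne : ((rest.map pvLast).foldl PySem.Set.add [pvLast r]).length ≠ 1 :=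
        fun hc => h ((foldl_add_singleton _ _).mp hc)
      simp only [PySem.Set.len] at *
      simp only [List.mem_map, forall_exists_index, and_imp,
        forall_apply_eq_imp_iff₂] at h
      simp [h]
      omega
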